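-- pv_equiv track=rewrite | github.com/mahi0097/intelli-book-summarizer | backend/postprocessing.py | _find_related_words
-- ===== SOURCE A (Python) =====
-- from collections import Counter
-- from typing import List, Dict, Tuple
--
-- def _find_related_words(keyword: str, all_words: List[str], window_size: int = 3) -> List[str]:
--     """Find words that frequently appear near the keyword"""
--     # Simplified implementation
--     related = []
--     for i, word in enumerate(all_words):
--         if word == keyword:
--             # Get words in window around keyword
--             start = max(0, i - window_size)
--             end = min(len(all_words), i + window_size + 1)
--             context = all_words[start:end]
--             related.extend([w for w in context if w != keyword])
--
--     # Count and return most frequent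
--     return [word for word, freq in Counter(related).most_common(3)]
-- ===== SOURCE B (Python) =====
-- from collections import Counter
--
--
-- def _find_related_words(keyword, all_words, window_size=3):
--     """Transposed formulation: precompute the keyword occurrence positions;
--     for each non-keyword position j, count the occurrences within
--     window_size of j and credit that word once per such occurrence;
--     then take the three most common words."""
--     occ = [i for i, w in enumerate(all_words) if w == keyword]
--     counts = Counter()
--     for j, w in enumerate(all_words):
--         if w == keyword:
--             continue
--         near = 0
--         for i in occ:
--             if j - window_size <= i <= j + window_size:
--                 near += 1
--         if near > 0:
--             counts[w] += near
--     return [word for word, _ in counts.most_common(3)]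
-- ===== Notes on version B (the rewrite author's own statement) =====
-- stated objective: alternative
-- what changed: Transposes A's loops: instead of materialising a context-word list around each keyword occurrence and feeding it to Counter, B makes one pass over word positions j, counts the keyword occurrences inside j's window, and credits word j by that count directly in a Counter; most_common(3) is unchanged.
-- intended difference: For window_size < 0 with a keyword occurrence at i where i+window_size+1 < 0, A's slice end becomes a negative index that wraps around, so A returns words from an accidental wrapped-around window; B returns [] there, the intended result since a negative window contains nothing. — e.g. on _find_related_words("c", ["c", "x", "x", "x"], -2): A returns ["x"], B returns []
import Mathlib
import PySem

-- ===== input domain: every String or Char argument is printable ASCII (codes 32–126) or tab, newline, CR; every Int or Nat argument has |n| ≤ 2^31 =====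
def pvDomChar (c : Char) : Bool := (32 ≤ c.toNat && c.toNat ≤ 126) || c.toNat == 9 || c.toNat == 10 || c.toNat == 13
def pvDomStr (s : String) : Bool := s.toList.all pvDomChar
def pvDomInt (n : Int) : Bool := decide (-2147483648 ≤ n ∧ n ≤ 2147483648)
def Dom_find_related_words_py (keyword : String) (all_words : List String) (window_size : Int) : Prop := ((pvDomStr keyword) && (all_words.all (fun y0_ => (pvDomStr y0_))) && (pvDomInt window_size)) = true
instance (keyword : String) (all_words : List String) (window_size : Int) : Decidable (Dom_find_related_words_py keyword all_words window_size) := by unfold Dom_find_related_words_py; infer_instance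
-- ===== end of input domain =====

-- B transposes A's loops (word-position outer, keyword-occurrence window inner) and counts
-- directly into a Counter instead of materialising a context list per keyword occurrence;
-- same cost class, genuinely different decomposition (objective: alternative).
-- Counter.most_common(3) is ported in both as its documented equivalent
-- sorted(items, key=itemgetter(1), reverse=True)[:3].

-- ===== PORT A =====
def find_related_words_py (keyword : String) (all_words : List String) (window_size : Int) : List String :=
  let related : List String :=
    (PySem.List.enumerate all_words).foldl (fun related iw =>
      if iw.2 == keyword then
        let start := max 0 (iw.1 - window_size)
        let stop := min (all_words.length : Int) (iw.1 + window_size + 1)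
        let context := PySem.List.slice all_words (some start) (some stop)
        related ++ context.filter (fun w => w != keyword)
      else related) []
  ((PySem.List.sorted (PySem.Dict.counter related).items (fun p => p.2) true).take 3).map (fun p => p.1)

-- ===== PORT B =====
def find_related_words_py_alt (keyword : String) (all_words : List String) (window_size : Int) : List String :=
  let occ : List Int :=
    ((PySem.List.enumerate all_words).filter (fun iw => iw.2 == keyword)).map (fun iw => iw.1)
  let counts : PySem.Dict String Int :=
    (PySem.List.enumerate all_words).foldl (fun d jw =>
      if jw.2 == keyword then d
      else
        let near : Int := occ.foldl (fun near i =>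
          if jw.1 - window_size ≤ i ∧ i ≤ jw.1 + window_size then near + 1 else near) 0
        if 0 < near then d.modify jw.2 0 (fun c => c + near) else d) PySem.Dict.empty
  ((PySem.List.sorted counts.items (fun p => p.2) true).take 3).map (fun p => p.1)

-- ===== PRECONDITION & SPEC =====
-- For window_size < 0, A's slice end i+window_size+1 can go negative and wrap around
-- (Python negative slice index), so A returns words from an accidental wrapped window,
-- while B returns [] — the intended result: a negative window contains nothing.
def D_find_related_words_py (keyword : String) (all_words : List String) (window_size : Int) : Prop :=
  window_size < 0 ∧ ∃ i j : Fin all_words.length,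
    all_words[i] = keyword ∧ all_words[j] ≠ keyword ∧ (i : Int) + window_size + 1 < 0 ∧
    (i : Int) - window_size ≤ (j : Int) ∧ (j : Int) < all_words.length + (i : Int) + window_size + 1
instance (keyword : String) (all_words : List String) (window_size : Int) : Decidable (D_find_related_words_py keyword all_words window_size) := by unfold D_find_related_words_py; infer_instance

def Spec_find_related_words_py (keyword : String) (all_words : List String) (window_size : Int) (out : List String) : Prop := ¬ D_find_related_words_py keyword all_words window_size → out = find_related_words_py_alt keyword all_words window_size
instance (keyword : String) (all_words : List String) (window_size : Int) (out : List String) : Decidable (Spec_find_related_words_py keyword all_words window_size out) := by unfold Spec_find_related_words_py; infer_instance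

def pvDiffWitness_find_related_words_py : String × List String × Int := ("c", ["c", "x", "x", "x"], -2)
def pvDiffWitnessOut_find_related_words_py : (List String) × (List String) := (["x"], [])

-- ===== CLAIM (what is proved, stated in full; the proofs are below) =====
def Claim_unchanged_find_related_words_py : Prop := ∀ (keyword : String) (all_words : List String) (window_size : Int), Dom_find_related_words_py keyword all_words window_size → Spec_find_related_words_py keyword all_words window_size (find_related_words_py keyword all_words window_size)
def Claim_changed_find_related_words_py : Prop := Dom_find_related_words_py (pvDiffWitness_find_related_words_py.1) (pvDiffWitness_find_related_words_py.2.1) (pvDiffWitness_find_related_words_py.2.2) ∧ D_find_related_words_py (pvDiffWitness_find_related_words_py.1) (pvDiffWitness_find_related_words_py.2.1) (pvDiffWitness_find_related_words_py.2.2) ∧ find_related_words_py (pvDiffWitness_find_related_words_py.1) (pvDiffWitness_find_related_words_py.2.1) (pvDiffWitness_find_related_words_py.2.2) = pvDiffWitnessOut_find_related_words_py.1 ∧ find_related_words_py_alt (pvDiffWitness_find_related_words_py.1) (pvDiffWitness_find_related_words_py.2.1) (pvDiffWitness_find_related_words_py.2.2) = pvDiffWitnessOut_find_related_words_py.2 ∧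 pvDiffWitnessOut_find_related_words_py.1 ≠ pvDiffWitnessOut_find_related_words_py.2
def Claim_exact_find_related_words_py : Prop := ∀ (keyword : String) (all_words : List String) (window_size : Int), Dom_find_related_words_py keyword all_words window_size → D_find_related_words_py keyword all_words window_size → find_related_words_py keyword all_words window_size ≠ find_related_words_py_alt keyword all_words window_size

-- ===== LEMMAS AND PROOFS =====

def pvWAt (xs : List String) (i : Int) : String := PySem.List.pyGetD xs i ""

lemma pv_wAt_cons (x : String) (xs : List String) (i : Int) (h : 1 ≤ i) (h2 : i < (x :: xs).length) :
    pvWAt (x :: xs) i = pvWAt xs (i - 1) := by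
  rw [pvWAt, pvWAt, PySem.List.pyGetD_eq_getElem _ _ (by omega) h2,
    PySem.List.pyGetD_eq_getElem _ _ (by omega) (by simp at h2 ⊢; omega)]
  have h3 : i.toNat = (i - 1).toNat + 1 := by omega
  simp only [h3, List.getElem_cons_succ]

lemma pv_enum_shift (xs : List String) : ∀ (s : Int),
    PySem.List.enumerate xs s
      = (PySem.List.pyRange s (s + xs.length)).map (fun i => (i, pvWAt xs (i - s))) := by
  induction xs with
  | nil => intro s; simp [PySem.List.enumerate, PySem.List.pyRange_one_eq_nil]
  | cons x xs ih =>
    intro s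
    have hlen : s + ((x :: xs).length : Int) = s + 1 + xs.length := by simp; ring
    rw [PySem.List.enumerate_cons, hlen, PySem.List.pyRange_one_cons (by omega)]
    simp only [List.map_cons, sub_self]
    refine congrArg₂ _ (by simp [pvWAt, PySem.List.pyGetD_zero_cons]) ?_
    rw [ih (s + 1)]
    refine List.map_congr_left (fun i hi => ?_)
    rw [PySem.List.mem_pyRange_one] at hi
    rw [pv_wAt_cons _ _ _ (by omega) (by omega)]
    ring_nf

lemma pv_enum_map (xs : List String) :
    PySem.List.enumerate xs 0 = (PySem.List.pyRange 0 xs.length).map (fun i => (i, pvWAt xs i)) := by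
  rw [pv_enum_shift xs 0, zero_add]
  exact List.map_congr_left (fun i _ => by rw [sub_zero])

def pvWin (n W i : Int) : List Int := PySem.List.pyRange (max 0 (i - W)) (min n (i + W + 1))
def pvCnt (K : String) (xs : List String) (W j : Int) : Nat :=
  ((pvWin xs.length W j).filter (fun i => pvWAt xs i == K)).length
def pvKeep (K : String) (xs : List String) (W j : Int) : Bool :=
  (pvWAt xs j != K) && decide (0 < pvCnt K xs W j)
def pvPj (K : String) (xs : List String) (W : Int) : List Int :=
  (PySem.List.pyRange 0 xs.length).filter (fun j => pvKeep K xs W j)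
def pvApairs (K : String) (xs : List String) (W : Int) : List ((Int × Int) × String) :=
  (PySem.List.pyRange 0 xs.length).flatMap (fun i =>
    if pvWAt xs i == K then
      ((pvWin xs.length W i).filter (fun j => pvWAt xs j != K)).map (fun j => ((i, j), pvWAt xs j))
    else [])
def pvRelA (K : String) (xs : List String) (W : Int) : List String := (pvApairs K xs W).map Prod.snd
def pvBD (K : String) (xs : List String) (W : Int) : PySem.Dict String Int :=
  (pvPj K xs W).foldl (fun d j => d.modify (pvWAt xs j) 0 (fun c => c + (pvCnt K xs W j : Int))) PySem.Dict.empty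
def pvMC3 (d : PySem.Dict String Int) : List String :=
  ((PySem.List.sorted d.items (fun p => p.2) true).take 3).map (fun p => p.1)

lemma pv_A_eq_raw (K : String) (xs : List String) (W : Int) :
    find_related_words_py K xs W
      = pvMC3 (PySem.Dict.counter ((PySem.List.pyRange 0 xs.length).flatMap (fun i =>
          if pvWAt xs i == K then
            (PySem.List.slice xs (some (max 0 (i - W))) (some (min (xs.length : Int) (i + W + 1)))).filter
              (fun w => w != K)
          else []))) := by
  rw [find_related_words_py, pv_enum_map, List.foldl_map]
  have h : (fun (related : List String) (i : Int) =>
        if (i, pvWAt xs i).2 == K then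
          related ++ (PySem.List.slice xs (some (max 0 ((i, pvWAt xs i).1 - W)))
            (some (min (xs.length : Int) ((i, pvWAt xs i).1 + W + 1)))).filter (fun w => w != K)
        else related)
      = (fun related i =>
          related ++ (if pvWAt xs i == K then
            (PySem.List.slice xs (some (max 0 (i - W))) (some (min (xs.length : Int) (i + W + 1)))).filter
              (fun w => w != K) else [])) := by
    funext rel i
    by_cases hc : pvWAt xs i == K <;> simp [hc]
  rw [h, PySem.List.foldl_append_eq_flatMap, List.nil_append, pvMC3]

lemma pv_occ_eq (K : String) (xs : List String) :
    (((PySem.List.pyRange 0 xs.length).map (fun i => (i, pvWAt xs i))).filter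
        (fun iw => iw.2 == K)).map (fun iw => iw.1)
      = (PySem.List.pyRange 0 xs.length).filter (fun i => pvWAt xs i == K) := by
  rw [List.filter_map, List.map_map]
  have h1 : ((fun iw : Int × String => iw.2 == K) ∘ (fun i => (i, pvWAt xs i)))
      = (fun i => pvWAt xs i == K) := rfl
  have h2 : ((fun iw : Int × String => iw.1) ∘ (fun i => (i, pvWAt xs i))) = id := rfl
  rw [h1, h2, List.map_id]

lemma pv_win_eq_filter (xs : List String) (W j : Int) :
    pvWin xs.length W j
      = (PySem.List.pyRange 0 xs.length).filter
          (fun i => decide (max 0 (j - W) ≤ i) && decide (i < min (xs.length : Int) (j + W + 1))) := by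
  refine List.eq_of_perm_of_sorted (le := fun a b : Int => a < b) (fun a b _ _ h1 h2 => by omega)
    ?_ ?_ ?_
  · rw [pvWin]; exact PySem.List.pairwise_lt_pyRange_one _ _
  · exact (PySem.List.pairwise_lt_pyRange_one _ _).filter _
  · refine (List.perm_ext_iff_of_nodup ?_ ?_).2 ?_
    · exact (PySem.List.pairwise_lt_pyRange_one _ _).imp (fun h => by omega) |>.nodup
    · exact (((PySem.List.pairwise_lt_pyRange_one _ _).imp (fun h => by omega)).nodup).filter _
    · intro x
      rw [pvWin, PySem.List.mem_pyRange_one, List.mem_filter, PySem.List.mem_pyRange_one]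
      constructor
      · intro h
        exact ⟨⟨by omega, by omega⟩, by simp; omega⟩
      · rintro ⟨⟨h1, h2⟩, h3⟩
        simp only [Bool.and_eq_true, decide_eq_true_eq] at h3
        omega

lemma pv_occ_count (K : String) (xs : List String) (W j : Int) :
    List.countP (fun i => decide (j - W ≤ i) && decide (i ≤ j + W))
        ((PySem.List.pyRange 0 xs.length).filter (fun i => pvWAt xs i == K))
      = pvCnt K xs W j := by
  rw [List.countP_filter, pvCnt, ← List.countP_eq_length_filter, pv_win_eq_filter,
    List.countP_filter]
  apply List.countP_congr
  intro i hi
  rw [PySem.List.mem_pyRange_one] at hi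
  by_cases hK : pvWAt xs i == K
  · simp only [hK, Bool.and_true, Bool.true_and]
    by_cases hin : j - W ≤ i ∧ i ≤ j + W
    · rw [decide_eq_true (by omega), decide_eq_true (by omega),
        decide_eq_true (by omega), decide_eq_true (by omega)]
    · have e1 : (decide (j - W ≤ i) && decide (i ≤ j + W)) = false := by
        rcases not_and_or.1 hin with h | h
        · rw [decide_eq_false h, Bool.false_and]
        · rw [decide_eq_false h, Bool.and_false]
      have e2 : (decide (max 0 (j - W) ≤ i) && decide (i < min (xs.length : Int) (j + W + 1))) = false := by
        rcases not_and_or.1 hin with h | h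
        · have hx : ¬ (max 0 (j - W) ≤ i) := by omega
          rw [decide_eq_false hx, Bool.false_and]
        · have hx : ¬ (i < min (xs.length : Int) (j + W + 1)) := by omega
          rw [decide_eq_false hx, Bool.and_false]
      rw [e1, e2]
  · simp [hK]

lemma pv_B_eq (K : String) (xs : List String) (W : Int) :
    find_related_words_py_alt K xs W = pvMC3 (pvBD K xs W) := by
  rw [find_related_words_py_alt, pv_enum_map, List.foldl_map, pvMC3]
  have hd : ∀ (d : PySem.Dict String Int) (j : Int),
      (if pvWAt xs j == K then d
       else
        if 0 < ((((PySem.List.pyRange 0 xs.length).map (fun i => (i, pvWAt xs i))).filter (fun iw => iw.2 == K)).map (fun iw => iw.1)).foldl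
            (fun near i => if j - W ≤ i ∧ i ≤ j + W then near + 1 else near) (0 : Int) then
          d.modify (pvWAt xs j) 0 (fun c => c +
            ((((PySem.List.pyRange 0 xs.length).map (fun i => (i, pvWAt xs i))).filter (fun iw => iw.2 == K)).map (fun iw => iw.1)).foldl
              (fun near i => if j - W ≤ i ∧ i ≤ j + W then near + 1 else near) (0 : Int))
        else d)
      = (if pvKeep K xs W j then d.modify (pvWAt xs j) 0 (fun c => c + (pvCnt K xs W j : Int)) else d) := by
    intro d j
    have hb : (fun (near : Int) (i : Int) => if j - W ≤ i ∧ i ≤ j + W then near + 1 else near)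
        = (fun near i => if (fun i => decide (j - W ≤ i) && decide (i ≤ j + W)) i = true
            then near + 1 else near) := by
      funext near i
      by_cases h : j - W ≤ i ∧ i ≤ j + W
      · rw [if_pos h, if_pos (by simp [h.1, h.2])]
      · rw [if_neg h, if_neg (by rcases not_and_or.1 h with h' | h' <;> simp [h'])]
    have hc : ((((PySem.List.pyRange 0 xs.length).map (fun i => (i, pvWAt xs i))).filter (fun iw => iw.2 == K)).map (fun iw => iw.1)).foldl
        (fun near i => if j - W ≤ i ∧ i ≤ j + W then near + 1 else near) (0 : Int)
        = (pvCnt K xs W j : Int) := by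
      rw [hb, PySem.List.foldl_count_if (fun i => decide (j - W ≤ i) && decide (i ≤ j + W)),
        zero_add, pv_occ_eq, pv_occ_count]
    rw [hc]
    by_cases h1 : pvWAt xs j = K
    · simp [pvKeep, h1]
    · simp [pvKeep, h1, Int.natCast_pos]
  rw [pvBD, pvPj, List.foldl_filter]
  refine congrArg _ (congrArg _ (congrArg (fun it : List (String × Int) => PySem.List.sorted it (fun p => p.2) true) (congrArg PySem.Dict.items ?_)))
  exact List.foldl_ext _ _ _ (fun d j _ => hd d j)

lemma pv_slice_eq_map (xs : List String) (a b : Int) (h0 : 0 ≤ a) (hb : b ≤ xs.length)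
    (hab : a ≤ b) :
    PySem.List.slice xs (some a) (some b) = (PySem.List.pyRange a b).map (pvWAt xs) := by
  rw [PySem.List.slice_of_nonneg xs h0 (le_trans h0 hab) (by omega) hb]
  apply List.ext_getElem
  · simp [PySem.List.length_pyRange_one]
    omega
  · intro k h1 h2
    simp only [List.getElem_take, List.getElem_drop, List.getElem_map,
      PySem.List.getElem_pyRange_one]
    rw [pvWAt, PySem.List.pyGetD_eq_getElem _ _ (by omega) (by
      simp only [List.length_take, List.length_drop] at h1
      omega)]
    congr 1
    simp only [List.length_take, List.length_drop] at h1
    omega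

lemma pv_A_eq_pos (K : String) (xs : List String) (W : Int) (hW : 0 ≤ W) :
    find_related_words_py K xs W = pvMC3 (PySem.Dict.counter (pvRelA K xs W)) := by
  rw [pv_A_eq_raw]
  congr 2
  rw [pvRelA, pvApairs, List.map_flatMap]
  apply List.flatMap_congr
  intro i hi
  rw [PySem.List.mem_pyRange_one] at hi
  by_cases hk : pvWAt xs i == K
  · simp only [hk, if_true, List.map_map]
    rw [pv_slice_eq_map xs _ _ (by omega) (by omega) (by omega), List.filter_map]
    rfl
  · simp [hk]

lemma pv_getD_fold {α : Type} (key : α → String) (val : α → Int) :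
    ∀ (l : List α) (d : PySem.Dict String Int) (w : String),
    (l.foldl (fun d j => d.modify (key j) 0 (fun c => c + val j)) d).getD w 0
      = d.getD w 0 + ((l.filter (fun j => key j == w)).map val).sum := by
  intro l
  induction l with
  | nil => simp
  | cons j l ih =>
    intro d w
    rw [List.foldl_cons, ih]
    by_cases h : key j = w
    · subst h
      rw [PySem.Dict.getD_modify_self]
      simp [add_assoc]
    · rw [PySem.Dict.getD_modify_of_ne _ _ _ (fun hh => h hh.symm)]
      simp only [List.filter_cons]
      have : (key j == w) = false := by simp [h]
      simp [this]

lemma pv_set_append_singleton {α : Type} [BEq α] (xs : List α) (x : α) :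
    PySem.Set.ofList (xs ++ [x]) = PySem.Set.add (PySem.Set.ofList xs) x := by
  rw [PySem.Set.ofList, PySem.Set.ofList, List.foldl_append, List.foldl_cons, List.foldl_nil]

lemma pv_items_fold {α : Type} (key : α → String) (val : α → Int) (l : List α) :
    (l.foldl (fun d j => d.modify (key j) 0 (fun c => c + val j)) PySem.Dict.empty).items
      = (PySem.Set.ofList (l.map key)).map
          (fun w => (w, ((l.filter (fun j => key j == w)).map val).sum)) := by
  induction l using List.reverseRecOn with
  | nil => rfl
  | append_singleton l j ih =>
    rw [List.foldl_append, List.foldl_cons, List.foldl_nil]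
    have hgd := pv_getD_fold key val l PySem.Dict.empty (key j)
    have hempty : (PySem.Dict.empty : PySem.Dict String Int).getD (key j) 0 = 0 := rfl
    rw [hempty, zero_add] at hgd
    have hkeys : (l.foldl (fun d j => d.modify (key j) 0 (fun c => c + val j)) PySem.Dict.empty).keys
        = PySem.Set.ofList (l.map key) := by
      rw [PySem.Dict.keys, ih, List.map_map]
      have hid : ((fun x : String × Int => x.1) ∘ (fun w => (w, ((l.filter (fun j => key j == w)).map val).sum))) = id := rfl
      rw [hid, List.map_id]
    rw [PySem.Dict.modify, hgd, PySem.Dict.insert]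
    rw [List.map_append, List.map_cons, List.map_nil, pv_set_append_singleton, PySem.Set.add]
    have hmem : ((l.foldl (fun d j => d.modify (key j) 0 (fun c => c + val j)) PySem.Dict.empty).contains (key j))
        = (PySem.Set.ofList (l.map key)).contains (key j) := by
      by_cases hm : key j ∈ PySem.Set.ofList (l.map key)
      · rw [((PySem.Dict.contains_iff_mem_keys _ _).2 (by rw [hkeys]; exact hm) : _ = true)]
        exact ((List.contains_iff_mem).2 hm).symm
      · have h1 : ((l.foldl (fun d j => d.modify (key j) 0 (fun c => c + val j)) PySem.Dict.empty).contains (key j)) = false := by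
          by_contra hcc
          exact hm (by rw [← hkeys]; exact (PySem.Dict.contains_iff_mem_keys _ _).1 (by simpa using hcc))
        rw [h1]
        exact (by simpa using hm : _ = false).symm
    by_cases hc : (PySem.Set.ofList (l.map key)).contains (key j)
    · rw [hmem, hc, if_pos rfl, if_pos rfl, ih, List.map_map]
      apply List.map_congr_left
      intro w hw
      simp only [Function.comp_apply]
      by_cases hwk : w = key j
      · subst hwk
        simp only [beq_self_eq_true, if_pos]
        rw [List.filter_append, List.map_append, List.sum_append]
        simp
      · have : ((w : String) == key j) = false := by simp [hwk]
        simp only [this]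
        rw [List.filter_append, List.map_append, List.sum_append]
        have : (key j == w) = false := by simp [(Ne.symm hwk : key j ≠ w)]
        simp [this]
    · have hcf : (PySem.Set.ofList (l.map key)).contains (key j) = false := by simpa using hc
      rw [hmem, hcf, if_neg (by simp), if_neg (by simp), ih]
      rw [List.map_append, List.map_cons, List.map_nil]
      refine congrArg₂ (· ++ ·) ?_ ?_
      · apply List.map_congr_left
        intro w hw
        rw [List.filter_append, List.map_append, List.sum_append]
        have hne : (key j == w) = false := by
          by_contra hcc
          have hkj : key j = w := by simpa using hcc
          have hct : (PySem.Set.ofList (l.map key)).contains (key j) = true :=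
            (List.contains_iff_mem).2 (hkj ▸ hw)
          rw [hct] at hcf
          exact absurd hcf (by simp)
        simp [hne]
      · rw [List.filter_append]
        have h1 : l.filter (fun i => key i == key j) = [] := by
          rw [List.filter_eq_nil_iff]
          intro a ha
          by_contra hcc
          have hkk : key a = key j := by simpa using hcc
          have : key j ∈ l.map key := by
            rw [← hkk]; exact List.mem_map_of_mem ha
          have hct : (PySem.Set.ofList (l.map key)).contains (key j) = true :=
            (List.contains_iff_mem).2 ((PySem.Set.mem_ofList _ _).2 this)
          rw [hct] at hcf
          exact absurd hcf (by simp)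
        simp [h1]

lemma pv_sum_filter {α : Type} (p : α → Bool) (g : α → Int) : ∀ (l : List α),
    ((l.filter p).map g).sum = (l.map (fun x => if p x then g x else 0)).sum := by
  intro l
  induction l with
  | nil => rfl
  | cons a l ih =>
    rw [List.filter_cons, List.map_cons]
    by_cases h : p a
    · simp only [h, if_true, List.map_cons, List.sum_cons, ih]
    · simp only [h, if_false, List.sum_cons]
      simp only [Bool.false_eq_true, if_false] at *
      rw [ih]
      omega

lemma pv_sum_comm (l2 : List Int) (f : Int → Int → Int) : ∀ (l1 : List Int),
    (l1.map (fun a => (l2.map (f a)).sum)).sum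
      = (l2.map (fun b => (l1.map (fun a => f a b)).sum)).sum := by
  intro l1
  induction l1 with
  | nil => simp
  | cons a l1 ih =>
    rw [List.map_cons, List.sum_cons, ih]
    have : (l2.map (fun b => ((a :: l1).map (fun a => f a b)).sum))
        = l2.map (fun b => f a b + (l1.map (fun a => f a b)).sum) := by
      simp
    rw [this, PySem.List.sum_map_add_int]

lemma pv_sum_ite_window (g : Int → Int) (lo hi n : Int) (h0 : 0 ≤ lo) (h1 : lo ≤ hi)
    (h2 : hi ≤ n) :
    ((PySem.List.pyRange 0 n).map (fun j => if lo ≤ j ∧ j < hi then g j else 0)).sum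
      = ((PySem.List.pyRange lo hi).map g).sum := by
  rw [PySem.List.pyRange_one_append 0 lo n h0 (le_trans h1 h2),
    PySem.List.pyRange_one_append lo hi n h1 h2, List.map_append, List.map_append,
    List.sum_append, List.sum_append]
  have hA : ((PySem.List.pyRange 0 lo).map (fun j => if lo ≤ j ∧ j < hi then g j else 0)).sum = 0 := by
    apply List.sum_eq_zero
    intro x hx
    simp only [List.mem_map] at hx
    obtain ⟨j, hj, rfl⟩ := hx
    rw [PySem.List.mem_pyRange_one] at hj
    rw [if_neg (by omega)]
  have hC : ((PySem.List.pyRange hi n).map (fun j => if lo ≤ j ∧ j < hi then g j else 0)).sum = 0 := by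
    apply List.sum_eq_zero
    intro x hx
    simp only [List.mem_map] at hx
    obtain ⟨j, hj, rfl⟩ := hx
    rw [PySem.List.mem_pyRange_one] at hj
    rw [if_neg (by omega)]
  rw [hA, hC]
  have hB : (PySem.List.pyRange lo hi).map (fun j => if lo ≤ j ∧ j < hi then g j else 0)
      = (PySem.List.pyRange lo hi).map g := by
    apply List.map_congr_left
    intro j hj
    rw [PySem.List.mem_pyRange_one] at hj
    rw [if_pos (by omega)]
  rw [hB]
  omega

def pvF (K : String) (xs : List String) (w : String) (i j : Int) : Int :=
  if (pvWAt xs i == K) && (pvWAt xs j == w) && (pvWAt xs j != K) then 1 else 0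

lemma pv_count_step1 (K : String) (xs : List String) (W : Int) (w : String) :
    ((pvRelA K xs W).count w : Int)
      = ((PySem.List.pyRange 0 xs.length).map
          (fun i => ((pvWin xs.length W i).map (fun j => pvF K xs w i j)).sum)).sum := by
  rw [pvRelA, List.count_eq_countP, List.countP_map, pvApairs, List.countP_flatMap,
    Nat.cast_list_sum, List.map_map]
  apply congrArg List.sum
  apply List.map_congr_left
  intro i hi
  simp only [Function.comp_apply]
  by_cases hK : pvWAt xs i == K
  · rw [if_pos hK, List.countP_map, List.countP_filter]
    rw [show ((pvWin xs.length W i).map (fun j => pvF K xs w i j)).sum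
        = ((pvWin xs.length W i).map (fun j =>
            if ((fun j => pvWAt xs j == w) ∘ (fun j => j)) j && (pvWAt xs j != K) && (pvWAt xs i == K) then (1:Int) else 0)).sum from by
      apply congrArg List.sum
      apply List.map_congr_left
      intro j _
      rw [pvF]
      by_cases h1 : pvWAt xs j == w <;> by_cases h2 : pvWAt xs j != K <;> simp [h1, h2, hK]]
    rw [PySem.List.sum_map_ite_one_zero]
    congr 1
    apply List.countP_congr
    intro j _
    simp [hK]
  · rw [if_neg hK]
    rw [List.countP_nil, Nat.cast_zero]
    symm
    apply List.sum_eq_zero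
    intro x hx
    simp only [List.mem_map] at hx
    obtain ⟨j, hj, rfl⟩ := hx
    rw [pvF]
    simp only [Bool.not_eq_true] at hK
    simp [hK]

lemma pv_count_step3 (K : String) (xs : List String) (W : Int) (w : String) (j : Int) :
    ((pvWin xs.length W j).map (fun i => pvF K xs w i j)).sum
      = (if (pvWAt xs j == w) && (pvWAt xs j != K) then (pvCnt K xs W j : Int) else 0) := by
  by_cases hc : (pvWAt xs j == w) && (pvWAt xs j != K)
  · rw [if_pos hc]
    rw [show ((pvWin xs.length W j).map (fun i => pvF K xs w i j)).sum
        = ((pvWin xs.length W j).map (fun i => if (fun i => pvWAt xs i == K) i then (1:Int) else 0)).sum from by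
      apply congrArg List.sum
      apply List.map_congr_left
      intro i _
      rw [pvF]
      simp only [Bool.and_eq_true] at hc
      simp [hc.1, hc.2]]
    rw [PySem.List.sum_map_ite_one_zero, pvCnt, List.countP_eq_length_filter]
  · rw [if_neg hc]
    apply List.sum_eq_zero
    intro x hx
    simp only [List.mem_map] at hx
    obtain ⟨i, hi, rfl⟩ := hx
    rw [pvF]
    simp only [Bool.and_eq_true, not_and, Bool.not_eq_true] at hc
    by_cases h1 : pvWAt xs j == w
    · simp [h1, hc h1]
    · simp [h1]

lemma pv_count_eq (K : String) (xs : List String) (W : Int) (hW : 0 ≤ W) (w : String) :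
    ((pvRelA K xs W).count w : Int)
      = (((pvPj K xs W).filter (fun j => pvWAt xs j == w)).map
          (fun j => (pvCnt K xs W j : Int))).sum := by
  rw [pv_count_step1]
  have h1 : ((PySem.List.pyRange 0 xs.length).map
        (fun i => ((pvWin xs.length W i).map (fun j => pvF K xs w i j)).sum)).sum
      = ((PySem.List.pyRange 0 xs.length).map
        (fun i => ((PySem.List.pyRange 0 xs.length).map
          (fun j => if max 0 (i - W) ≤ j ∧ j < min (xs.length : Int) (i + W + 1)
                    then pvF K xs w i j else 0)).sum)).sum := by
    apply congrArg List.sum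
    apply List.map_congr_left
    intro i hi
    rw [PySem.List.mem_pyRange_one] at hi
    rw [pv_sum_ite_window _ _ _ _ (by omega) (by omega) (by omega)]
    rfl
  rw [h1, pv_sum_comm]
  have h2 : ((PySem.List.pyRange 0 xs.length).map
        (fun j => ((PySem.List.pyRange 0 xs.length).map
          (fun i => if max 0 (i - W) ≤ j ∧ j < min (xs.length : Int) (i + W + 1)
                    then pvF K xs w i j else 0)).sum)).sum
      = ((PySem.List.pyRange 0 xs.length).map
        (fun j => ((pvWin xs.length W j).map (fun i => pvF K xs w i j)).sum)).sum := by
    apply congrArg List.sum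
    apply List.map_congr_left
    intro j hj
    rw [PySem.List.mem_pyRange_one] at hj
    rw [show ((PySem.List.pyRange 0 xs.length).map
          (fun i => if max 0 (i - W) ≤ j ∧ j < min (xs.length : Int) (i + W + 1)
                    then pvF K xs w i j else 0))
        = ((PySem.List.pyRange 0 xs.length).map
          (fun i => if max 0 (j - W) ≤ i ∧ i < min (xs.length : Int) (j + W + 1)
                    then pvF K xs w i j else 0)) from by
      apply List.map_congr_left
      intro i hi
      rw [PySem.List.mem_pyRange_one] at hi
      exact if_congr (by omega) rfl rfl]
    rw [pv_sum_ite_window _ _ _ _ (by omega) (by omega) (by omega)]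
    rfl
  rw [h2]
  have h3 : ((PySem.List.pyRange 0 xs.length).map
        (fun j => ((pvWin xs.length W j).map (fun i => pvF K xs w i j)).sum)).sum
      = ((PySem.List.pyRange 0 xs.length).map
        (fun j => if (pvWAt xs j == w) && (pvWAt xs j != K) then (pvCnt K xs W j : Int) else 0)).sum := by
    apply congrArg List.sum
    apply List.map_congr_left
    intro j _
    rw [pv_count_step3]
  rw [h3, pvPj, List.filter_filter, pv_sum_filter]
  apply congrArg List.sum
  apply List.map_congr_left
  intro j _
  by_cases hz : pvCnt K xs W j = 0
  · by_cases h1 : (pvWAt xs j == w) <;> by_cases h2 : (pvWAt xs j != K) <;>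
      simp [pvKeep, h1, h2, hz]
  · have hpos : 0 < pvCnt K xs W j := Nat.pos_of_ne_zero hz
    by_cases h1 : (pvWAt xs j == w) <;> by_cases h2 : (pvWAt xs j != K) <;>
      simp [pvKeep, h1, h2, hpos]

def pvFpos {α π : Type} (l : List α) (key : α → String) (pos : α → π) (dflt : π) (w : String) : π :=
  ((l.find? (fun x => key x == w)).map pos).getD dflt

lemma pv_fpos_append_of_mem {α π : Type} (l : List α) (x : α) (key : α → String)
    (pos : α → π) (dflt : π) (w : String) (h : w ∈ l.map key) :
    pvFpos (l ++ [x]) key pos dflt w = pvFpos l key pos dflt w := by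
  rw [pvFpos, pvFpos, List.find?_append]
  obtain ⟨y, hy, rfl⟩ := List.mem_map.1 h
  have : (l.find? (fun x => key x == key y)).isSome := by
    rw [List.find?_isSome]
    exact ⟨y, hy, by simp⟩
  obtain ⟨z, hz⟩ := Option.isSome_iff_exists.1 this
  rw [hz]
  rfl

lemma pv_fpos_append_self {α π : Type} (l : List α) (x : α) (key : α → String)
    (pos : α → π) (dflt : π) (h : ¬ key x ∈ l.map key) :
    pvFpos (l ++ [x]) key pos dflt (key x) = pos x := by
  rw [pvFpos, List.find?_append]
  have h1 : l.find? (fun y => key y == key x) = none := by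
    rw [List.find?_eq_none]
    intro y hy
    simp only [beq_iff_eq]
    intro hc
    exact h (hc ▸ List.mem_map_of_mem hy)
  rw [h1]
  simp

lemma pv_set_pairwise {α π : Type} (key : α → String) (pos : α → π) (R : π → π → Prop)
    (dflt : π) :
    ∀ (l : List α), (l.map pos).Pairwise R →
    (PySem.Set.ofList (l.map key)).Pairwise
      (fun a b => R (pvFpos l key pos dflt a) (pvFpos l key pos dflt b)) := by
  intro l
  induction l using List.reverseRecOn with
  | nil => intro _; simp
  | append_singleton l x ih =>
    intro hp
    rw [List.map_append] at hp
    obtain ⟨hl, -, hcross⟩ := List.pairwise_append.1 hp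
    have ihp := ih hl
    rw [List.map_append, List.map_cons, List.map_nil, pv_set_append_singleton, PySem.Set.add]
    by_cases hc : (PySem.Set.ofList (l.map key)).contains (key x)
    · rw [if_pos hc]
      refine ihp.imp_of_mem ?_
      intro a b ha hb hab
      rw [pv_fpos_append_of_mem _ _ _ _ _ _ ((PySem.Set.mem_ofList _ _).1 ha),
        pv_fpos_append_of_mem _ _ _ _ _ _ ((PySem.Set.mem_ofList _ _).1 hb)]
      exact hab
    · rw [if_neg hc]
      have hnm : ¬ key x ∈ l.map key := by
        intro hm
        exact hc ((List.contains_iff_mem).2 ((PySem.Set.mem_ofList _ _).2 hm))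
      rw [List.pairwise_append]
      refine ⟨?_, List.pairwise_singleton _ _, ?_⟩
      · refine ihp.imp_of_mem ?_
        intro a b ha hb hab
        rw [pv_fpos_append_of_mem _ _ _ _ _ _ ((PySem.Set.mem_ofList _ _).1 ha),
          pv_fpos_append_of_mem _ _ _ _ _ _ ((PySem.Set.mem_ofList _ _).1 hb)]
        exact hab
      · intro a ha b hb
        rw [List.mem_singleton] at hb
        subst hb
        have ham := (PySem.Set.mem_ofList _ _).1 ha
        rw [pv_fpos_append_of_mem _ _ _ _ _ _ ham, pv_fpos_append_self _ _ _ _ _ hnm]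
        obtain ⟨y, hy, rfl⟩ := List.mem_map.1 ham
        rw [pvFpos]
        have : (l.find? (fun z => key z == key y)).isSome := by
          rw [List.find?_isSome]
          exact ⟨y, hy, by simp⟩
        obtain ⟨z, hz⟩ := Option.isSome_iff_exists.1 this
        rw [hz]
        simp only [Option.map_some, Option.getD_some]
        exact hcross _ (List.mem_map_of_mem (List.mem_of_find?_eq_some hz)) _ (by simp)

lemma pv_find_min {α π : Type} (key : α → String) (pos : α → π) (R : π → π → Prop)
    (w : String) :
    ∀ (l : List α), (l.map pos).Pairwise R → ∀ x0, l.find? (fun x => key x == w) = some x0 →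
      ∀ y ∈ l, key y = w → x0 = y ∨ R (pos x0) (pos y) := by
  intro l
  induction l with
  | nil => intro _ x0 h; cases h
  | cons a l ih =>
    intro hp x0 hf y hy hkey
    rw [List.map_cons, List.pairwise_cons] at hp
    by_cases hc : (fun x => key x == w) a
    · rw [List.find?_cons_of_pos (p := fun x => key x == w) (l := l) hc] at hf
      cases hf
      rcases List.mem_cons.1 hy with rfl | hy2
      · exact Or.inl rfl
      · exact Or.inr (hp.1 _ (List.mem_map_of_mem hy2))
    · rw [List.find?_cons_of_neg (p := fun x => key x == w) (l := l) hc] at hf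
      rcases List.mem_cons.1 hy with rfl | hy2
      · exact absurd (by simp [hkey]) hc
      · exact ih hp.2 x0 hf y hy2 hkey

def pvLex (p q : Int × Int) : Prop := p.1 < q.1 ∨ (p.1 = q.1 ∧ p.2 < q.2)

lemma pv_mem_Apairs (K : String) (xs : List String) (W : Int) (i j : Int) (w' : String) :
    ((i, j), w') ∈ pvApairs K xs W
      ↔ 0 ≤ i ∧ i < xs.length ∧ pvWAt xs i = K ∧ max 0 (i - W) ≤ j
          ∧ j < min (xs.length : Int) (i + W + 1) ∧ pvWAt xs j ≠ K ∧ w' = pvWAt xs j := by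
  simp only [pvApairs, List.mem_flatMap, PySem.List.mem_pyRange_one]
  constructor
  · rintro ⟨i', hi', hp⟩
    by_cases hK : pvWAt xs i' == K
    · rw [if_pos hK] at hp
      simp only [List.mem_map, List.mem_filter, pvWin, PySem.List.mem_pyRange_one] at hp
      obtain ⟨j', ⟨⟨hj1, hj2⟩, hj3⟩, heq⟩ := hp
      have e1 : i' = i := congrArg (fun p => p.1.1) heq
      have e2 : j' = j := congrArg (fun p => p.1.2) heq
      have e3 : pvWAt xs j' = w' := congrArg Prod.snd heq
      subst e1
      subst e2
      exact ⟨hi'.1, hi'.2, by simpa using hK, hj1, hj2, by simpa using hj3, e3.symm⟩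
    · rw [if_neg hK] at hp
      simp at hp
  · rintro ⟨h1, h2, h3, h4, h5, h6, rfl⟩
    refine ⟨i, ⟨h1, h2⟩, ?_⟩
    rw [if_pos (by simp [h3])]
    simp only [List.mem_map, List.mem_filter, pvWin, PySem.List.mem_pyRange_one]
    exact ⟨j, ⟨⟨h4, h5⟩, by simp [h6]⟩, rfl⟩

lemma pv_mem_Pj (K : String) (xs : List String) (W : Int) (j : Int) :
    j ∈ pvPj K xs W
      ↔ 0 ≤ j ∧ j < xs.length ∧ pvWAt xs j ≠ K
          ∧ ∃ i, max 0 (j - W) ≤ i ∧ i < min (xs.length : Int) (j + W + 1) ∧ pvWAt xs i = K := by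
  rw [pvPj, List.mem_filter, PySem.List.mem_pyRange_one, pvKeep]
  have hcnt : (decide (0 < pvCnt K xs W j) = true)
      ↔ ∃ i, max 0 (j - W) ≤ i ∧ i < min (xs.length : Int) (j + W + 1) ∧ pvWAt xs i = K := by
    rw [decide_eq_true_iff, pvCnt]
    constructor
    · intro h
      obtain ⟨x, hx⟩ := List.exists_mem_of_length_pos h
      rw [List.mem_filter, pvWin, PySem.List.mem_pyRange_one] at hx
      exact ⟨x, hx.1.1, hx.1.2, by simpa using hx.2⟩
    · rintro ⟨i, hi1, hi2, hi3⟩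
      exact List.length_pos_of_mem (List.mem_filter.2
        ⟨by rw [pvWin, PySem.List.mem_pyRange_one]; exact ⟨hi1, hi2⟩, by simp [hi3]⟩)
  constructor
  · rintro ⟨⟨hj1, hj2⟩, hk⟩
    rw [Bool.and_eq_true] at hk
    exact ⟨hj1, hj2, by simpa using hk.1, hcnt.1 hk.2⟩
  · rintro ⟨h1, h2, h3, hex⟩
    exact ⟨⟨h1, h2⟩, by rw [Bool.and_eq_true]; exact ⟨by simpa using h3, hcnt.2 hex⟩⟩

lemma pv_pairwise_Pj (K : String) (xs : List String) (W : Int) :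
    (pvPj K xs W).Pairwise (· < ·) :=
  (PySem.List.pairwise_lt_pyRange_one _ _).filter _

lemma pv_pairwise_Apairs (K : String) (xs : List String) (W : Int) :
    ((pvApairs K xs W).map Prod.fst).Pairwise pvLex := by
  rw [pvApairs, List.map_flatMap]
  rw [List.pairwise_flatMap]
  constructor
  · intro i _
    by_cases hK : pvWAt xs i == K
    · rw [if_pos hK, List.map_map]
      have : (Prod.fst ∘ fun j => ((i, j), pvWAt xs j)) = (fun j => (i, j)) := rfl
      rw [this]
      refine List.Pairwise.map _ ?_ (((PySem.List.pairwise_lt_pyRange_one _ _).filter _))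
      intro a b hab
      exact Or.inr ⟨rfl, hab⟩
    · rw [if_neg hK]
      simp
  · have := PySem.List.pairwise_lt_pyRange_one 0 (xs.length : Int)
    refine this.imp_of_mem ?_
    intro i1 i2 _ _ h12 x hx y hy
    by_cases hK1 : pvWAt xs i1 == K
    · by_cases hK2 : pvWAt xs i2 == K
      · rw [if_pos hK1, List.map_map] at hx
        rw [if_pos hK2, List.map_map] at hy
        simp only [List.mem_map] at hx hy
        obtain ⟨a, -, rfl⟩ := hx
        obtain ⟨b, -, rfl⟩ := hy
        exact Or.inl h12
      · rw [if_neg hK2] at hy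
        simp at hy
    · rw [if_neg hK1] at hx
      simp at hx

def pvFB (K : String) (xs : List String) (W : Int) (w : String) : Int :=
  pvFpos (pvPj K xs W) (fun j => pvWAt xs j) id 0 w

def pvFA (K : String) (xs : List String) (W : Int) (w : String) : Int × Int :=
  pvFpos (pvApairs K xs W) Prod.snd Prod.fst (0, 0) w

lemma pv_FB_spec (K : String) (xs : List String) (W : Int) (w : String)
    (hw : w ∈ (pvPj K xs W).map (pvWAt xs)) :
    (pvPj K xs W).find? (fun j => pvWAt xs j == w) = some (pvFB K xs W w)
      ∧ pvFB K xs W w ∈ pvPj K xs W ∧ pvWAt xs (pvFB K xs W w) = w := by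
  obtain ⟨y, hy, rfl⟩ := List.mem_map.1 hw
  have : ((pvPj K xs W).find? (fun j => pvWAt xs j == pvWAt xs y)).isSome := by
    rw [List.find?_isSome]
    exact ⟨y, hy, by simp⟩
  obtain ⟨z, hz⟩ := Option.isSome_iff_exists.1 this
  have hfb : pvFB K xs W (pvWAt xs y) = z := by
    rw [pvFB, pvFpos, hz]
    rfl
  rw [hfb]
  exact ⟨hz, List.mem_of_find?_eq_some hz, by simpa using List.find?_some hz⟩

lemma pv_FA_spec (K : String) (xs : List String) (W : Int) (w : String)
    (hw : w ∈ pvRelA K xs W) :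
    ∃ pa, (pvApairs K xs W).find? (fun x => x.2 == w) = some pa
      ∧ pvFA K xs W w = pa.1 ∧ pa ∈ pvApairs K xs W ∧ pa.2 = w := by
  obtain ⟨y, hy, rfl⟩ := List.mem_map.1 hw
  have : ((pvApairs K xs W).find? (fun x => x.2 == y.2)).isSome := by
    rw [List.find?_isSome]
    exact ⟨y, hy, by simp⟩
  obtain ⟨z, hz⟩ := Option.isSome_iff_exists.1 this
  exact ⟨z, hz, by rw [pvFA, pvFpos, hz]; rfl, List.mem_of_find?_eq_some hz,
    by simpa using List.find?_some hz⟩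

lemma pv_mem_equiv (K : String) (xs : List String) (W : Int) (hW : 0 ≤ W) (w : String) :
    w ∈ pvRelA K xs W ↔ w ∈ (pvPj K xs W).map (pvWAt xs) := by
  constructor
  · intro h
    obtain ⟨⟨⟨i, j⟩, w'⟩, hx, rfl⟩ := List.mem_map.1 h
    obtain ⟨h1, h2, h3, h4, h5, h6, h7⟩ := (pv_mem_Apairs K xs W i j w').1 hx
    refine List.mem_map.2 ⟨j, (pv_mem_Pj K xs W j).2 ⟨by omega, by omega, h6, i, by omega, by omega, h3⟩, h7.symm⟩
  · intro h
    obtain ⟨j, hj, rfl⟩ := List.mem_map.1 h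
    obtain ⟨h1, h2, h3, i, hi1, hi2, hi3⟩ := (pv_mem_Pj K xs W j).1 hj
    exact List.mem_map.2 ⟨((i, j), pvWAt xs j),
      (pv_mem_Apairs K xs W i j (pvWAt xs j)).2 ⟨by omega, by omega, hi3, by omega, by omega, h3, rfl⟩, rfl⟩

lemma pv_core (K : String) (xs : List String) (W : Int) (hW : 0 ≤ W) (a b : String)
    (ha : a ∈ (pvPj K xs W).map (pvWAt xs)) (hb : b ∈ (pvPj K xs W).map (pvWAt xs))
    (hlt : pvFB K xs W a < pvFB K xs W b) :
    pvLex (pvFA K xs W a) (pvFA K xs W b) := by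
  obtain ⟨hfba, hja_mem, hja_w⟩ := pv_FB_spec K xs W a ha
  obtain ⟨hfbb, hjb_mem, hjb_w⟩ := pv_FB_spec K xs W b hb
  obtain ⟨pa, hfa, hfaeq, hpa_mem, hpa_w⟩ := pv_FA_spec K xs W a ((pv_mem_equiv K xs W hW a).2 ha)
  obtain ⟨pb, hfb, hfbeq, hpb_mem, hpb_w⟩ := pv_FA_spec K xs W b ((pv_mem_equiv K xs W hW b).2 hb)
  set ja := pvFB K xs W a with hja_def
  set jb := pvFB K xs W b with hjb_def
  obtain ⟨⟨i1, j1⟩, a'⟩ := pa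
  obtain ⟨⟨i2, j2⟩, b'⟩ := pb
  simp only at hpa_w hpb_w
  subst hpa_w
  subst hpb_w
  obtain ⟨hA1, hA2, hA3, hA4, hA5, hA6, hA7⟩ := (pv_mem_Apairs K xs W i1 j1 a').1 hpa_mem
  obtain ⟨hB1, hB2, hB3, hB4, hB5, hB6, hB7⟩ := (pv_mem_Apairs K xs W i2 j2 b').1 hpb_mem
  obtain ⟨hP1, hP2, hP3, istar, hs1, hs2, hs3⟩ := (pv_mem_Pj K xs W ja).1 hja_mem
  -- (istar, ja) is an A-pair for a
  have hstar_mem : ((istar, ja), a') ∈ pvApairs K xs W :=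
    (pv_mem_Apairs K xs W istar ja a').2 ⟨by omega, by omega, hs3, by omega, by omega, hP3, hja_w.symm⟩
  have hmin_star := pv_find_min Prod.snd Prod.fst pvLex a' (pvApairs K xs W)
    (pv_pairwise_Apairs K xs W) _ hfa _ hstar_mem (by simpa using hja_w)
  -- j2 is in Pj with word b
  have hj2_mem : j2 ∈ pvPj K xs W :=
    (pv_mem_Pj K xs W j2).2 ⟨by omega, by omega, hB6, i2, by omega, by omega, hB3⟩
  have hmin_b := pv_find_min (fun j => pvWAt xs j) id (· < ·) b' (pvPj K xs W)
    (by rw [List.map_id]; exact pv_pairwise_Pj K xs W) _ hfbb _ hj2_mem hB7.symm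
  rw [hfaeq, hfbeq]
  simp only [id] at hmin_b
  by_contra hno
  have hle_star : i1 < istar ∨ (i1 = istar ∧ j1 ≤ ja) := by
    rcases hmin_star with heq | hlex
    · have e1 : i1 = istar := congrArg (fun p => p.1.1) heq
      have e2 : j1 = ja := congrArg (fun p => p.1.2) heq
      omega
    · simp only [pvLex] at hlex
      omega
  have hle_b : jb ≤ j2 := by rcases hmin_b with heq | h; omega; omega
  simp only [pvLex] at hno
  by_cases hc : max 0 (ja - W) ≤ i2 ∧ i2 < min (xs.length : Int) (ja + W + 1)
  · have hmem2 : ((i2, ja), a') ∈ pvApairs K xs W :=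
      (pv_mem_Apairs K xs W i2 ja a').2 ⟨by omega, by omega, hB3, by omega, by omega, hP3, hja_w.symm⟩
    have hmin2 := pv_find_min Prod.snd Prod.fst pvLex a' (pvApairs K xs W)
      (pv_pairwise_Apairs K xs W) _ hfa _ hmem2 (by simpa using hja_w)
    rcases hmin2 with heq | hlex
    · have e1 : i1 = i2 := congrArg (fun p => p.1.1) heq
      have e2 : j1 = ja := congrArg (fun p => p.1.2) heq
      omega
    · simp only [pvLex] at hlex
      omega
  · omega

lemma pv_set_eq (K : String) (xs : List String) (W : Int) (hW : 0 ≤ W) :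
    PySem.Set.ofList (pvRelA K xs W) = PySem.Set.ofList ((pvPj K xs W).map (pvWAt xs)) := by
  have hmem : ∀ w, w ∈ PySem.Set.ofList (pvRelA K xs W)
      ↔ w ∈ PySem.Set.ofList ((pvPj K xs W).map (pvWAt xs)) := by
    intro w
    rw [PySem.Set.mem_ofList, PySem.Set.mem_ofList]
    exact pv_mem_equiv K xs W hW w
  have hperm := (List.perm_ext_iff_of_nodup (PySem.Set.nodup_ofList _) (PySem.Set.nodup_ofList _)).2 hmem
  have hpB := pv_set_pairwise (fun j => pvWAt xs j) id (· < ·) 0 (pvPj K xs W)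
    (by rw [List.map_id]; exact pv_pairwise_Pj K xs W)
  have hpA := pv_set_pairwise Prod.snd Prod.fst pvLex (0, 0) (pvApairs K xs W)
    (pv_pairwise_Apairs K xs W)
  have hFBinj : ∀ a b : String, a ∈ (pvPj K xs W).map (pvWAt xs) → b ∈ (pvPj K xs W).map (pvWAt xs)
      → pvFB K xs W a = pvFB K xs W b → a = b := by
    intro a b ha hb heq
    obtain ⟨-, -, hwa⟩ := pv_FB_spec K xs W a ha
    obtain ⟨-, -, hwb⟩ := pv_FB_spec K xs W b hb
    rw [← hwa, ← hwb, heq]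
  have hpA' : (PySem.Set.ofList (pvRelA K xs W)).Pairwise
      (fun a b => pvFB K xs W a < pvFB K xs W b) := by
    refine hpA.imp_of_mem ?_
    intro a b ha hb hq
    have ha' : a ∈ (pvPj K xs W).map (pvWAt xs) :=
      (pv_mem_equiv K xs W hW a).1 ((PySem.Set.mem_ofList _ _).1 ha)
    have hb' : b ∈ (pvPj K xs W).map (pvWAt xs) :=
      (pv_mem_equiv K xs W hW b).1 ((PySem.Set.mem_ofList _ _).1 hb)
    rcases lt_trichotomy (pvFB K xs W a) (pvFB K xs W b) with h | h | h
    · exact h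
    · exact absurd (hFBinj a b ha' hb' h ▸ hq) (by simp only [pvLex]; omega)
    · have := pv_core K xs W hW b a hb' ha' h
      simp only [pvLex, pvFA] at hq this
      omega
  exact List.eq_of_perm_of_sorted
    (fun a b _ _ h1 h2 => by omega) hpA' hpB hperm

lemma pv_B_neg (K : String) (xs : List String) (W : Int) (hw : W < 0) :
    find_related_words_py_alt K xs W = [] := by
  rw [pv_B_eq]
  have hPj : pvPj K xs W = [] := by
    rw [pvPj, List.filter_eq_nil_iff]
    intro j hj
    have : pvCnt K xs W j = 0 := by
      rw [pvCnt, pvWin, PySem.List.pyRange_one_eq_nil (by omega)]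
      rfl
    simp [pvKeep, this]
  rw [pvBD, hPj, List.foldl_nil]
  rfl

lemma pv_wAt_getElem (xs : List String) (j : Int) (h0 : 0 ≤ j) (h1 : j < xs.length) :
    pvWAt xs j = xs[j.toNat]'(by omega) := by
  rw [pvWAt, PySem.List.pyGetD_eq_getElem _ _ h0 h1]

lemma pv_A_neg (K : String) (xs : List String) (W : Int) (hw : W < 0)
    (hnd : ¬ D_find_related_words_py K xs W) :
    find_related_words_py K xs W = [] := by
  rw [pv_A_eq_raw]
  have hraw : ((PySem.List.pyRange 0 xs.length).flatMap (fun i =>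
      if pvWAt xs i == K then
        (PySem.List.slice xs (some (max 0 (i - W))) (some (min (xs.length : Int) (i + W + 1)))).filter
          (fun w => w != K)
      else [])) = [] := by
    rw [List.flatMap_eq_nil_iff]
    intro i hi
    rw [PySem.List.mem_pyRange_one] at hi
    by_cases hK : pvWAt xs i == K
    · rw [if_pos hK, List.filter_eq_nil_iff]
      intro a ha
      have hslice : PySem.List.slice xs (some (max 0 (i - W))) (some (min (xs.length : Int) (i + W + 1)))
          = List.take (PySem.List.clampIdx xs.length (min (xs.length : Int) (i + W + 1))
              - PySem.List.clampIdx xs.length (max 0 (i - W)))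
            (List.drop (PySem.List.clampIdx xs.length (max 0 (i - W))) xs) := rfl
      rw [hslice] at ha
      obtain ⟨k, hk, hak⟩ := List.mem_iff_getElem.1 ha
      simp only [List.length_take, List.length_drop] at hk
      set cs := PySem.List.clampIdx xs.length (max 0 (i - W)) with hcs
      set ct := PySem.List.clampIdx xs.length (min (xs.length : Int) (i + W + 1)) with hct
      have hcs' : (cs : Int) = min (i - W) xs.length := by
        rw [hcs, PySem.List.clampIdx]
        split_ifs <;> push_cast <;> omega
      have hneg : (i : Int) + W + 1 < 0 := by
        by_contra hpos
        -- then the slice is empty: ct ≤ cs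
        have hct' : (ct : Int) ≤ i + W + 1 := by
          rw [hct, PySem.List.clampIdx]
          split_ifs <;> push_cast <;> omega
        omega
      have hct' : (ct : Int) = max 0 ((xs.length : Int) + min (xs.length : Int) (i + W + 1)) := by
        rw [hct, PySem.List.clampIdx]
        split_ifs <;> push_cast <;> omega
      -- the element is xs[cs + k], and every such index is excluded by ¬D
      rw [List.getElem_take, List.getElem_drop] at hak
      simp only [Bool.not_eq_true, bne_eq_false_iff_eq]
      by_contra hne
      apply hnd
      refine ⟨hw, ⟨i.toNat, by omega⟩, ⟨cs + k, by omega⟩, ?_, ?_, ?_, ?_, ?_⟩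
      · have h2 := pv_wAt_getElem xs i (by omega) (by omega)
        rw [h2] at hK
        exact beq_iff_eq.1 hK
      · exact fun hh => hne (hak.symm.trans hh)
      · push_cast; omega
      · push_cast; omega
      · push_cast; omega
    · rw [if_neg hK]
  rw [hraw]
  rfl

lemma pv_main_pos (K : String) (xs : List String) (W : Int) (hW : 0 ≤ W) :
    find_related_words_py K xs W = find_related_words_py_alt K xs W := by
  rw [pv_A_eq_pos K xs W hW, pv_B_eq, pvMC3, pvMC3]
  have hitems : (PySem.Dict.counter (pvRelA K xs W)).items = (pvBD K xs W).items := by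
    rw [PySem.Dict.items_counter, pvBD,
      pv_items_fold (fun j => pvWAt xs j) (fun j => (pvCnt K xs W j : Int)) (pvPj K xs W),
      ← pv_set_eq K xs W hW]
    apply List.map_congr_left
    intro w hw
    rw [PySem.Set.mem_ofList] at hw
    exact congrArg _ (pv_count_eq K xs W hW w)
  rw [hitems]

lemma pv_A_ne_nil (K : String) (xs : List String) (W : Int)
    (hd : D_find_related_words_py K xs W) :
    find_related_words_py K xs W ≠ [] := by
  obtain ⟨hw, i, j, h1, h2, h3, h4, h5⟩ := hd
  rw [pv_A_eq_raw]
  set rel := ((PySem.List.pyRange 0 xs.length).flatMap (fun i =>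
      if pvWAt xs i == K then
        (PySem.List.slice xs (some (max 0 (i - W))) (some (min (xs.length : Int) (i + W + 1)))).filter
          (fun w => w != K)
      else [])) with hrel
  have hmem : xs[j] ∈ rel := by
    rw [hrel, List.mem_flatMap]
    refine ⟨(i : Int), by rw [PySem.List.mem_pyRange_one]; constructor <;> [omega; exact_mod_cast i.2], ?_⟩
    rw [if_pos (by rw [pv_wAt_getElem xs i (by omega) (by exact_mod_cast i.2)]; simpa using h1)]
    rw [List.mem_filter]
    constructor
    · have hslice : PySem.List.slice xs (some (max 0 ((i : Int) - W))) (some (min (xs.length : Int) ((i : Int) + W + 1)))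
          = List.take (PySem.List.clampIdx xs.length (min (xs.length : Int) ((i : Int) + W + 1))
              - PySem.List.clampIdx xs.length (max 0 ((i : Int) - W)))
            (List.drop (PySem.List.clampIdx xs.length (max 0 ((i : Int) - W))) xs) := rfl
      rw [hslice]
      set cs := PySem.List.clampIdx xs.length (max 0 ((i : Int) - W)) with hcs
      set ct := PySem.List.clampIdx xs.length (min (xs.length : Int) ((i : Int) + W + 1)) with hct
      have hj : (j : Int) < xs.length := by exact_mod_cast j.2
      have hcs' : (cs : Int) = (i : Int) - W := by
        rw [hcs, PySem.List.clampIdx]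
        split_ifs <;> push_cast <;> omega
      have hct' : (ct : Int) = (xs.length : Int) + (i : Int) + W + 1 := by
        rw [hct, PySem.List.clampIdx]
        split_ifs <;> push_cast <;> omega
      rw [List.mem_iff_getElem]
      refine ⟨(j : Nat) - cs, by simp only [List.length_take, List.length_drop]; omega, ?_⟩
      rw [List.getElem_take, List.getElem_drop]
      congr 1
      omega
    · simpa using h2
  intro hnil
  rw [pvMC3, List.map_eq_nil_iff, List.take_eq_nil_iff] at hnil
  rcases hnil with h | h
  · cases h
  · rw [PySem.List.sorted_eq_nil_iff] at h
    have : xs[j] ∈ (PySem.Dict.counter rel).keys := by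
      rw [PySem.Dict.keys_counter, PySem.Set.mem_ofList]
      exact hmem
    rw [PySem.Dict.keys, h] at this
    cases this

-- ===== VERDICT (by name: the statement is the Claim_ definition above) =====
theorem find_related_words_py_spec : Claim_unchanged_find_related_words_py := by
  intro keyword all_words window_size _ hnD
  by_cases hW : 0 ≤ window_size
  · exact pv_main_pos keyword all_words window_size hW
  · rw [pv_A_neg keyword all_words window_size (by omega) hnD,
      pv_B_neg keyword all_words window_size (by omega)]
theorem find_related_words_py_changed : Claim_changed_find_related_words_py := by
  unfold Claim_changed_find_related_words_py; decide
theorem find_related_words_py_tight : Claim_exact_find_related_words_py := by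
  intro keyword all_words window_size _ hd
  rw [pv_B_neg keyword all_words window_size hd.1]
  exact pv_A_ne_nil keyword all_words window_size hd
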